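-- pv_equiv track=rewrite | github.com/itsmemdtofik/Python | Arrays/Easy/InsertDuplicate.py | insertDuplicate
-- ===== SOURCE A (Python) =====
-- def insertDuplicate(nums, K):
--     if nums is None or len(nums) == 0 or len(nums) < 2:
--         return nums
--
--     count = 0
--     for i in range(len(nums)):
--         if nums[i] == K:
--             count += 1
--
--     n = len(nums) + count
--     newarr = [0] * n
--     j = 0
--
--     for i in range(len(nums)):
--         newarr[j] = nums[i]
--         j += 1
--         if nums[i] == K:
--             newarr[j] = K
--             j += 1
--
--     return newarr
-- ===== SOURCE B (Python) =====
-- def insertDuplicate(nums, K):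
--     if nums is None or len(nums) < 2:
--         return nums
--     out = list(nums)
--     i = 0
--     while i < len(out):
--         if out[i] == K:
--             out.insert(i + 1, K)
--             i += 2
--         else:
--             i += 1
--     return out
-- ===== Notes on version B (the rewrite author's own statement) =====
-- stated objective: alternative
-- what changed: Instead of counting matches and filling a preallocated array with two index counters, B copies the input once and then runs an in-place insertion scan: a while loop over the growing list that inserts an extra K right after each occurrence and skips past it, so no second output buffer or size computation exists.
import Mathlib
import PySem

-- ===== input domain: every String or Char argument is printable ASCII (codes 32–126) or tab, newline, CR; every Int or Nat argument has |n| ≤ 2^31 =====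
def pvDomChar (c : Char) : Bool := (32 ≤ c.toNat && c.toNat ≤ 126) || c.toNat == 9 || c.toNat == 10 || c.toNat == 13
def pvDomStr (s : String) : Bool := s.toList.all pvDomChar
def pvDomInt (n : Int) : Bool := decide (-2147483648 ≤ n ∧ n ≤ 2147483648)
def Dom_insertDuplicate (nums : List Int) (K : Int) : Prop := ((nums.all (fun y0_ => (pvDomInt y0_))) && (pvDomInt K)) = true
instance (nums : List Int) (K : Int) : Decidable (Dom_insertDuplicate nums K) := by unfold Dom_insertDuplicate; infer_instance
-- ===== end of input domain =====

-- B replaces A's count-then-fill-a-preallocated-array algorithm with an in-place insertion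
-- scan over a growing copy of the list (objective: alternative). Return value only; neither
-- version mutates its argument.

-- ===== PORT A =====
-- body of A's second loop: write nums[i] at j, and K again after it when nums[i] == K
def stepA (K : Int) (st : List Int × Nat) (x : Int) : List Int × Nat :=
  let arr := st.1.set st.2 x
  let j := st.2 + 1
  if x = K then (arr.set j K, j + 1) else (arr, j)

def insertDuplicate (nums : List Int) (K : Int) : List Int :=
  if nums.length = 0 ∨ nums.length < 2 then nums
  else
    let count : Int := (PySem.List.pyRange 0 nums.length 1).foldl
      (fun c i => if PySem.List.pyGetD nums i 0 = K then c + 1 else c) 0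
    let n : Int := (nums.length : Int) + count
    let newarr : List Int := List.replicate n.toNat 0
    let st := (PySem.List.pyRange 0 nums.length 1).foldl
      (fun (st : List Int × Nat) i => stepA K st (PySem.List.pyGetD nums i 0)) (newarr, 0)
    st.1

-- ===== PORT B =====
-- B's while loop: scan the growing list, inserting an extra K after each occurrence.
-- fuel bounds the iteration count (each iteration passes one ORIGINAL element, so
-- nums.length + 1 steps always reach the exit check; proved in insLoop_eq below)
def insLoop (K : Int) (fuel : Nat) (out : List Int) (i : Nat) : List Int :=
  match fuel with
  | 0 => out
  | fuel + 1 =>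
    if i < out.length then
      if out.getD i 0 = K then
        insLoop K fuel (PySem.List.insert out ((i : Int) + 1) K) (i + 2)
      else
        insLoop K fuel out (i + 1)
    else out

def insertDuplicate_alt (nums : List Int) (K : Int) : List Int :=
  if nums.length < 2 then nums
  else insLoop K (nums.length + 1) nums 0

-- ===== PRECONDITION & SPEC =====
def Spec_insertDuplicate (nums : List Int) (K : Int) (out : List Int) : Prop := out = insertDuplicate_alt nums K
instance (nums : List Int) (K : Int) (out : List Int) : Decidable (Spec_insertDuplicate nums K out) := by unfold Spec_insertDuplicate; infer_instance

-- ===== CLAIM =====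
def Claim_equal_insertDuplicate : Prop := ∀ (nums : List Int) (K : Int), Dom_insertDuplicate nums K → Spec_insertDuplicate nums K (insertDuplicate nums K)

-- ===== LEMMAS AND PROOFS =====

-- the duplication function, as a flatMap block
def dupF (K x : Int) : List Int := if x = K then [x, x] else [x]

lemma count_foldl_eq (K : Int) (l : List Int) (c : Int) :
    l.foldl (fun c x => if x = K then c + 1 else c) c = c + (l.countP (· = K) : Int) := by
  induction l generalizing c with
  | nil => simp
  | cons x xs ih =>
    by_cases hx : x = K <;> simp [hx, ih]
    ring

lemma flatMap_dupF_length (K : Int) (l : List Int) :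
    (l.flatMap (dupF K)).length = l.length + l.countP (· = K) := by
  induction l with
  | nil => simp
  | cons x xs ih =>
    by_cases hx : x = K <;> simp [dupF, hx, ih] <;> omega

-- writing at the seam of acc ++ (p :: ps) replaces p
lemma set_at_len (acc : List Int) (p : Int) (ps : List Int) (v : Int) :
    (acc ++ p :: ps).set acc.length v = acc ++ v :: ps := by
  rw [List.set_append]
  simp

-- loop invariant of A's fill loop: arr = written prefix ++ scratch space, j = prefix length
lemma fill_loop (K : Int) (l acc pad : List Int)
    (h : pad.length = (l.flatMap (dupF K)).length) :
    l.foldl (stepA K) (acc ++ pad, acc.length)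
      = (acc ++ l.flatMap (dupF K), acc.length + (l.flatMap (dupF K)).length) := by
  induction l generalizing acc pad with
  | nil =>
    simp at h
    subst h
    simp
  | cons x xs ih =>
    by_cases hx : x = K
    · subst hx
      have hlen : 2 <= pad.length := by
        simp [dupF] at h; omega
      obtain ⟨p1, p2, ps, rfl⟩ : ∃ p1 p2 ps, pad = p1 :: p2 :: ps := by
        match pad, hlen with
        | p1 :: p2 :: ps, _ => exact ⟨p1, p2, ps, rfl⟩
      have e2 : (acc ++ x :: p2 :: ps).set (acc.length + 1) x = (acc ++ [x, x]) ++ ps := by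
        have h1 : acc ++ x :: p2 :: ps = (acc ++ [x]) ++ p2 :: ps := by simp
        have h2 : acc.length + 1 = (acc ++ [x]).length := by simp
        rw [h1, h2, set_at_len]
        simp
      have hstep : stepA x (acc ++ p1 :: p2 :: ps, acc.length) x
          = ((acc ++ [x, x]) ++ ps, acc.length + 2) := by
        simp only [stepA, if_true]
        rw [set_at_len, e2]
      rw [List.foldl_cons, hstep,
          show acc.length + 2 = (acc ++ [x, x]).length from by simp,
          ih _ ps (by simp [dupF] at h ⊢; omega)]
      simp [dupF, List.append_assoc]
      omega
    · have hlen : 1 <= pad.length := by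
        simp [dupF, hx] at h; omega
      obtain ⟨p1, ps, rfl⟩ : ∃ p1 ps, pad = p1 :: ps := by
        match pad, hlen with
        | p1 :: ps, _ => exact ⟨p1, ps, rfl⟩
      have hstep : stepA K (acc ++ p1 :: ps, acc.length) x
          = ((acc ++ [x]) ++ ps, acc.length + 1) := by
        simp only [stepA]
        rw [if_neg hx, set_at_len]
        simp
      rw [List.foldl_cons, hstep,
          show acc.length + 1 = (acc ++ [x]).length from by simp,
          ih _ ps (by simp [dupF, hx] at h ⊢; omega)]
      simp [dupF, hx, List.append_assoc]
      omega

-- invariant of B's insertion scan: the part before i is already fully duplicated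
lemma insLoop_eq (K : Int) (rest : List Int) : ∀ (acc : List Int) (fuel : Nat),
    rest.length < fuel →
    insLoop K fuel (acc ++ rest) acc.length = acc ++ rest.flatMap (dupF K) := by
  induction rest with
  | nil =>
    intro acc fuel hf
    obtain ⟨f, rfl⟩ : ∃ f, fuel = f + 1 := ⟨fuel - 1, by omega⟩
    rw [insLoop]
    simp
  | cons x xs ih =>
    intro acc fuel hf
    obtain ⟨f, rfl⟩ : ∃ f, fuel = f + 1 := ⟨fuel - 1, by omega⟩
    rw [insLoop]
    have hi : acc.length < (acc ++ x :: xs).length := by simp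
    have hget : (acc ++ x :: xs).getD acc.length 0 = x := by
      simp [List.getD]
    rw [if_pos hi, hget]
    by_cases hx : x = K
    · subst hx
      have hins : PySem.List.insert (acc ++ x :: xs) ((acc.length : Int) + 1) x
          = (acc ++ [x, x]) ++ xs := by
        have hp : acc.length + 1 ≤ (acc ++ x :: xs).length := by simp
        have := PySem.List.insert_natCast (acc ++ x :: xs) (acc.length + 1) x hp
        push_cast at this
        rw [this]
        have t1 : List.take (acc.length + 1) acc = acc := List.take_of_length_le (by omega)
        have t2 : List.drop (acc.length + 1) acc = ([] : List Int) := List.drop_eq_nil_of_le (by omega)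
        simp [List.take_append, List.drop_append, t1, t2]
      rw [if_pos rfl, hins,
          show acc.length + 2 = (acc ++ [x, x]).length from by simp,
          ih (acc ++ [x, x]) f (by simp at hf ⊢; omega)]
      simp [dupF]
    · rw [if_neg hx,
          show acc ++ x :: xs = (acc ++ [x]) ++ xs from by simp,
          show acc.length + 1 = (acc ++ [x]).length from by simp,
          ih (acc ++ [x]) f (by simp at hf ⊢; omega)]
      simp [dupF, hx]

-- ===== VERDICT =====
theorem insertDuplicate_spec : Claim_equal_insertDuplicate := by
  intro nums K _
  show insertDuplicate nums K = insertDuplicate_alt nums K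
  unfold insertDuplicate insertDuplicate_alt
  by_cases hs : nums.length < 2
  · simp [hs]
  · rw [if_neg (show ¬ (nums.length = 0 ∨ nums.length < 2) by omega), if_neg hs]
    dsimp only
    rw [PySem.List.foldl_pyRange_zero_pyGetD' nums 0
          (fun c v => if v = K then c + 1 else c) (0 : Int),
        PySem.List.foldl_pyRange_zero_pyGetD' nums 0 (stepA K) _,
        count_foldl_eq]
    have hn : ((nums.length : Int) + ((0 : Int) + (nums.countP (· = K) : Int))).toNat
        = (nums.flatMap (dupF K)).length := by
      rw [flatMap_dupF_length]; omega
    have hfill := fill_loop K nums []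
      (List.replicate ((nums.length : Int) + ((0 : Int) + (nums.countP (· = K) : Int))).toNat 0)
      (by rw [List.length_replicate]; exact hn)
    simp only [List.nil_append, List.length_nil] at hfill
    rw [hfill]
    have := insLoop_eq K nums [] (nums.length + 1) (by omega)
    simpa using this.symm
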